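-- pv_equiv track=rewrite | github.com/fwilleke80/TextTools | textlib/fun.py | find_nth_vowel
-- ===== SOURCE A (Python) =====
-- def find_nth_vowel(string, n, lastIfNotEnough=False):
--     # TOTO: n < 0 does not work correctly yet
--     vowels = u'aeiouäöü'
--
--     foundVowels = 0
--     foundAt = -1
--
--     # Start at string beginning, forward
--     if n >= 0:
--         for i,c in enumerate(string):
--             if c in vowels:
--                 if foundVowels == n:
--                     return i
--                 foundVowels += 1
--                 foundAt = i
--
--     # Start at string end, backward
--     else:
--         #print 'searching backwards'
--         searchIn = string[::-1]
--         #print searchIn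
--         for i,c in enumerate(searchIn):
--             if c in vowels:
--                 foundVowels += 1
--                 if foundVowels == abs(n):
--                     #print i
--                     return len(searchIn) - (i + 1)
--                 foundAt = len(searchIn) - (i + 1)
--
--
--     if foundVowels > 0 and lastIfNotEnough:
--         return foundAt
--
--     return -1
-- ===== SOURCE B (Python) =====
-- def find_nth_vowel(string, n, lastIfNotEnough=False):
--     pos = [i for i, c in enumerate(string) if c in u'aeiouäöü']
--     if n >= 0:
--         if n < len(pos):
--             return pos[n]
--         if pos and lastIfNotEnough:
--             return pos[-1]
--     else:
--         k = -n
--         if k <= len(pos):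
--             return pos[-k]
--         if pos and lastIfNotEnough:
--             return pos[0]
--     return -1
-- ===== Notes on version B (the rewrite author's own statement) =====
-- stated objective: simpler
-- what changed: A's two direction-dependent early-exit scans (forward, and over the reversed string) are replaced by one comprehension collecting all vowel positions followed by purely arithmetic index selection (pos[n] / pos[-k], with pos[-1] / pos[0] as the asymmetric lastIfNotEnough fallbacks).
import Mathlib
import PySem

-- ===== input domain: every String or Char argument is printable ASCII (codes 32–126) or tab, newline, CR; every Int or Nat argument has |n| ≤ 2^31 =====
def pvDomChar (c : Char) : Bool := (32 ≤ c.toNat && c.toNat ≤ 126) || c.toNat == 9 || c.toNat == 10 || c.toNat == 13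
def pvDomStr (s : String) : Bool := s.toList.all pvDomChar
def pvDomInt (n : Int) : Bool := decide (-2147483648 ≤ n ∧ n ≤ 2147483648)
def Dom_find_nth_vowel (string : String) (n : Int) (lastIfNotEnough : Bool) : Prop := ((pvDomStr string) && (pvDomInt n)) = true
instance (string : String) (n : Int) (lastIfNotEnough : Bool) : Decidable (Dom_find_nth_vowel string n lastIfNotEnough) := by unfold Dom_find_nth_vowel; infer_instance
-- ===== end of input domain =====

-- B replaces A's two direction-dependent early-exit scans by one comprehension collecting all
-- vowel positions followed by arithmetic index selection (objective: simpler).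

-- shared constant: membership in the vowel string u'aeiouäöü' (a single char in str = char membership)
def pvIsVowel (c : Char) : Bool := ['a', 'e', 'i', 'o', 'u', 'ä', 'ö', 'ü'].contains c

-- ===== PORT A =====
-- forward loop: .inl = early `return i`; .inr = final (foundVowels, foundAt)
def pvLoopF (n : Int) : List (Int × Char) → Int → Int → Int ⊕ (Int × Int)
  | [], fv, fa => .inr (fv, fa)
  | (i, c) :: rest, fv, fa =>
    if pvIsVowel c then
      if fv = n then .inl i
      else pvLoopF n rest (fv + 1) i
    else pvLoopF n rest fv fa

-- backward loop over enumerate(searchIn): .inl = early `return len - (i+1)`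
def pvLoopB (L K : Int) : List (Int × Char) → Int → Int → Int ⊕ (Int × Int)
  | [], fv, fa => .inr (fv, fa)
  | (i, c) :: rest, fv, fa =>
    if pvIsVowel c then
      if fv + 1 = K then .inl (L - (i + 1))
      else pvLoopB L K rest (fv + 1) (L - (i + 1))
    else pvLoopB L K rest fv fa

def find_nth_vowel (string : String) (n : Int) (lastIfNotEnough : Bool) : Int :=
  if 0 ≤ n then
    match pvLoopF n (PySem.List.enumerate string.toList 0) 0 (-1) with
    | .inl i => i
    | .inr (fv, fa) => if fv > 0 && lastIfNotEnough then fa else -1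
  else
    -- searchIn = string[::-1]  (cf. PySem.List.slice?_none_none_neg_one: [::-1] is reverse)
    let searchIn := string.toList.reverse
    match pvLoopB (searchIn.length : Int) |n| (PySem.List.enumerate searchIn 0) 0 (-1) with
    | .inl i => i
    | .inr (fv, fa) => if fv > 0 && lastIfNotEnough then fa else -1

-- ===== PORT B =====
def find_nth_vowel_alt (string : String) (n : Int) (lastIfNotEnough : Bool) : Int :=
  let pos : List Int :=
    ((PySem.List.enumerate string.toList 0).filter (fun p => pvIsVowel p.2)).map (·.1)
  if 0 ≤ n then
    if n < (pos.length : Int) then PySem.List.pyGetD pos n 0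
    else if !pos.isEmpty && lastIfNotEnough then PySem.List.pyGetD pos (-1) 0
    else -1
  else
    let k := -n
    if k ≤ (pos.length : Int) then PySem.List.pyGetD pos (-k) 0
    else if !pos.isEmpty && lastIfNotEnough then PySem.List.pyGetD pos 0 0
    else -1

-- ===== PRECONDITION & SPEC =====
def Spec_find_nth_vowel (string : String) (n : Int) (lastIfNotEnough : Bool) (out : Int) : Prop := out = find_nth_vowel_alt string n lastIfNotEnough
instance (string : String) (n : Int) (lastIfNotEnough : Bool) (out : Int) : Decidable (Spec_find_nth_vowel string n lastIfNotEnough out) := by unfold Spec_find_nth_vowel; infer_instance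

-- ===== CLAIM (what is proved, stated in full; the proofs are below) =====
def Claim_equal_find_nth_vowel : Prop := ∀ (string : String) (n : Int) (lastIfNotEnough : Bool), Dom_find_nth_vowel string n lastIfNotEnough → Spec_find_nth_vowel string n lastIfNotEnough (find_nth_vowel string n lastIfNotEnough)

-- ===== LEMMAS AND PROOFS =====

-- the vowel positions recorded in an (index, char) list, as B collects them
def pvPos (l : List (Int × Char)) : List Int :=
  (l.filter (fun p => pvIsVowel p.2)).map (·.1)

theorem pvPos_nil : pvPos [] = [] := rfl

theorem pvPos_cons (i : Int) (c : Char) (l : List (Int × Char)) :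
    pvPos ((i, c) :: l) = if pvIsVowel c then i :: pvPos l else pvPos l := by
  by_cases h : pvIsVowel c <;> simp [pvPos, h]

-- forward loop ≡ index-selection on pvPos
theorem pvLoopF_spec (n : Int) (l : List (Int × Char)) (fv fa : Int) (h : fv ≤ n) :
    pvLoopF n l fv fa =
      if (n - fv).toNat < (pvPos l).length then .inl ((pvPos l).getD (n - fv).toNat 0)
      else .inr (fv + (pvPos l).length, (pvPos l).getLastD fa) := by
  induction l generalizing fv fa with
  | nil => simp [pvLoopF, pvPos_nil]
  | cons p rest ih =>
    obtain ⟨i, c⟩ := p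
    by_cases hv : pvIsVowel c
    · rw [pvLoopF]
      simp only [hv, if_true, pvPos_cons]
      by_cases he : fv = n
      · subst he
        simp
      · have h1 : fv + 1 ≤ n := by omega
        rw [if_neg he, ih _ _ h1]
        have hnz : (n - fv).toNat = (n - (fv + 1)).toNat + 1 := by omega
        simp only [List.length_cons]
        split_ifs with ha hb hb
        · simp [hnz]
        · omega
        · omega
        · rw [List.getLastD_cons]
          simp only [Sum.inr.injEq, Prod.mk.injEq]
          constructor
          · push_cast; ring
          · trivial
    · rw [pvLoopF]
      simp only [hv, Bool.false_eq_true, if_false, pvPos_cons]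
      exact ih _ _ h

-- backward loop ≡ index-selection on the (L-(i+1))-images of the vowel entries
def pvPosB (L : Int) (l : List (Int × Char)) : List Int :=
  (l.filter (fun p => pvIsVowel p.2)).map (fun p => L - (p.1 + 1))

theorem pvPosB_cons (L i : Int) (c : Char) (l : List (Int × Char)) :
    pvPosB L ((i, c) :: l) = if pvIsVowel c then (L - (i + 1)) :: pvPosB L l else pvPosB L l := by
  by_cases h : pvIsVowel c <;> simp [pvPosB, h]

theorem pvLoopB_spec (L K : Int) (l : List (Int × Char)) (fv fa : Int) (h : fv < K) :
    pvLoopB L K l fv fa =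
      if (K - fv - 1).toNat < (pvPosB L l).length then .inl ((pvPosB L l).getD (K - fv - 1).toNat 0)
      else .inr (fv + (pvPosB L l).length, (pvPosB L l).getLastD fa) := by
  induction l generalizing fv fa with
  | nil => simp [pvLoopB, pvPosB]
  | cons p rest ih =>
    obtain ⟨i, c⟩ := p
    by_cases hv : pvIsVowel c
    · rw [pvLoopB]
      simp only [hv, if_true, pvPosB_cons]
      by_cases he : fv + 1 = K
      · have h0 : (K - fv - 1).toNat = 0 := by omega
        simp [he, h0]
      · have h1 : fv + 1 < K := by omega
        rw [if_neg he, ih _ _ h1]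
        have hnz : (K - fv - 1).toNat = (K - (fv + 1) - 1).toNat + 1 := by omega
        simp only [List.length_cons]
        split_ifs with ha hb hb
        · simp [hnz]
        · omega
        · omega
        · rw [List.getLastD_cons]
          simp only [Sum.inr.injEq, Prod.mk.injEq]
          constructor
          · push_cast; ring
          · trivial
    · rw [pvLoopB]
      simp only [hv, Bool.false_eq_true, if_false, pvPosB_cons]
      exact ih _ _ h

theorem pvPosB_nil (L : Int) : pvPosB L [] = [] := rfl

theorem pvPosB_append (L : Int) (a b : List (Int × Char)) :
    pvPosB L (a ++ b) = pvPosB L a ++ pvPosB L b := by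
  simp [pvPosB]

-- the backward position list over the reversed string is the reverse of B's pos list
theorem pvPosB_reverse (xs : List Char) (L : Int) :
    pvPosB L (PySem.List.enumerate xs.reverse 0)
      = (pvPos (PySem.List.enumerate xs (L - xs.length))).reverse := by
  induction xs generalizing L with
  | nil => simp [pvPosB, pvPos, PySem.List.enumerate_nil]
  | cons y t ih =>
    rw [List.reverse_cons, PySem.List.enumerate_append, pvPosB_append, ih]
    conv_rhs => rw [PySem.List.enumerate_cons, pvPos_cons]
    have hst : L - ((y :: t).length : Int) + 1 = L - t.length := by
      simp only [List.length_cons]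
      push_cast
      ring
    rw [hst]
    by_cases hv : pvIsVowel y
    · simp [hv, pvPosB_cons, pvPosB_nil, PySem.List.enumerate_nil, PySem.List.enumerate_cons]
    · simp [hv, pvPosB_cons, pvPosB_nil, PySem.List.enumerate_nil, PySem.List.enumerate_cons]

-- ===== VERDICT (by name: the statement is the Claim_ definition above) =====
theorem find_nth_vowel_spec : Claim_equal_find_nth_vowel := by
  intro s n last _
  show find_nth_vowel s n last = find_nth_vowel_alt s n last
  unfold find_nth_vowel find_nth_vowel_alt
  have hBpos : (((PySem.List.enumerate s.toList 0).filter (fun p => pvIsVowel p.2)).map (·.1))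
      = pvPos (PySem.List.enumerate s.toList 0) := rfl
  rw [hBpos]
  by_cases hn : 0 ≤ n
  · simp only [if_pos hn]
    rw [pvLoopF_spec n _ 0 (-1) hn]
    have hsub : (n - 0).toNat = n.toNat := by omega
    rw [hsub]
    by_cases h1 : n.toNat < (pvPos (PySem.List.enumerate s.toList 0)).length
    · rw [if_pos h1]
      dsimp only
      rw [if_pos (show n < ((pvPos (PySem.List.enumerate s.toList 0)).length : Int) by omega)]
      rw [PySem.List.pyGetD_of_nonneg _ _ hn]
    · rw [if_neg h1]
      dsimp only
      rw [if_neg (show ¬ n < ((pvPos (PySem.List.enumerate s.toList 0)).length : Int) by omega)]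
      by_cases h2 : pvPos (PySem.List.enumerate s.toList 0) = []
      · simp [h2]
      · have hlen : 0 < (pvPos (PySem.List.enumerate s.toList 0)).length := List.length_pos_iff.mpr h2
        have cA : (decide ((0:Int) + ((pvPos (PySem.List.enumerate s.toList 0)).length : Int) > 0) && last) = last := by
          have : ((0:Int) + ((pvPos (PySem.List.enumerate s.toList 0)).length : Int) > 0) := by omega
          rw [decide_eq_true this, Bool.true_and]
        have cB : (!(pvPos (PySem.List.enumerate s.toList 0)).isEmpty && last) = last := by
          simp [h2]
        rw [cA, cB]
        by_cases h3 : last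
        · simp only [h3, if_true]
          rw [PySem.List.pyGetD_neg_one _ _ h2, List.getLastD_eq_getLast?, List.getLast?_eq_some_getLast h2]
          rfl
        · simp [h3]
  · simp only [if_neg hn]
    rw [abs_of_neg (show n < 0 by omega)]
    rw [pvLoopB_spec _ _ _ 0 (-1) (by omega : (0:Int) < -n)]
    have hL : ((s.toList.reverse.length : Nat) : Int) = ((s.toList.length : Nat) : Int) := by simp
    rw [hL, pvPosB_reverse s.toList ((s.toList.length : Nat) : Int)]
    rw [show (((s.toList.length : Nat) : Int) - (s.toList.length : Nat)) = 0 from by ring]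
    by_cases h1 : (-n - 0 - 1).toNat < (pvPos (PySem.List.enumerate s.toList 0)).reverse.length
    · rw [if_pos h1]
      dsimp only
      have hlenr : (-n - 1).toNat < (pvPos (PySem.List.enumerate s.toList 0)).length := by
        simp only [List.length_reverse] at h1; omega
      rw [if_pos (show -n ≤ ((pvPos (PySem.List.enumerate s.toList 0)).length : Int) by omega)]
      rw [List.getD_eq_getElem _ _ h1, List.getElem_reverse]
      conv_rhs => rw [show (- -n) = (-(((-n).toNat : Nat) : Int)) from by omega]
      rw [PySem.List.pyGetD_neg_natCast _ _ _ (by omega) (by omega)]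
      congr 1
      omega
    · rw [if_neg h1]
      dsimp only
      have hnlen : ¬ (-n) ≤ ((pvPos (PySem.List.enumerate s.toList 0)).length : Int) := by
        simp only [List.length_reverse] at h1; omega
      rw [if_neg hnlen]
      by_cases h2 : pvPos (PySem.List.enumerate s.toList 0) = []
      · simp [h2]
      · have hlen : 0 < (pvPos (PySem.List.enumerate s.toList 0)).length := List.length_pos_iff.mpr h2
        have cA : (decide ((0:Int) + (((pvPos (PySem.List.enumerate s.toList 0)).reverse.length : Nat) : Int) > 0) && last) = last := by
          have : ((0:Int) + (((pvPos (PySem.List.enumerate s.toList 0)).reverse.length : Nat) : Int) > 0) := by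
            simp only [List.length_reverse]; omega
          rw [decide_eq_true this, Bool.true_and]
        have cB : (!(pvPos (PySem.List.enumerate s.toList 0)).isEmpty && last) = last := by
          simp [h2]
        rw [cA, cB]
        by_cases h3 : last
        · simp only [h3, if_true]
          rw [PySem.List.pyGetD_of_nonneg _ _ (le_refl (0:Int))]
          rw [List.getLastD_eq_getLast?, List.getLast?_reverse]
          cases hp : pvPos (PySem.List.enumerate s.toList 0) with
          | nil => exact absurd hp h2
          | cons a t => simp
        · simp [h3]
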